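-- pv_equiv track=rewrite | github.com/Aryudesu/ABC | ABC/300_399/396/D.py | calc
-- ===== SOURCE A (Python) =====
-- INF = 2 ** 61
--
-- def calc(graph, node, memo, N, res = 0):
--     if node == N:
--         return res
--     next_node = graph.get(node, [])
--     result = INF
--     for u, w in next_node:
--         if u in memo:
--             continue
--         memo.add(u)
--         r = calc(graph, u, memo, N, res ^ w)
--         memo.discard(u)
--         if r < result:
--             result = r
--     return result
-- ===== SOURCE B (Python) =====
-- INF = 2 ** 61
--
-- def calc(graph, node, memo, N, res = 0):
--     # Iterative backtracking DFS with an explicit stack of frames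
--     # [cur, acc_xor, edges, next_index, best_result]; memo is marked on
--     # push and un-marked on pop (net effect on memo is zero, as in the
--     # recursive version).
--     if node == N:
--         return res
--     stack = [[node, res, graph.get(node, []), 0, INF]]
--     while True:
--         frame = stack[-1]
--         cur, acc, edges, i, result = frame
--         if i < len(edges):
--             frame[3] = i + 1
--             u, w = edges[i]
--             if u in memo:
--                 continue
--             if u == N:
--                 if acc ^ w < result:
--                     frame[4] = acc ^ w
--                 continue
--             memo.add(u)
--             stack.append([u, acc ^ w, graph.get(u, []), 0, INF])
--         else:
--             stack.pop()
--             if not stack: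
--                 return result
--             memo.discard(cur)
--             if result < stack[-1][4]:
--                 stack[-1][4] = result
--     return INF
-- ===== Notes on version B (the rewrite author's own statement) =====
-- stated objective: alternative
-- what changed: The recursive backtracking DFS is replaced by an iterative DFS over an explicit stack of frames (node, accumulated xor, edge list, next edge index, best result), marking a node when its frame is pushed and un-marking it when it is popped, with neighbors equal to N folded into the frame's result immediately instead of through a recursive call.
import Mathlib
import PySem

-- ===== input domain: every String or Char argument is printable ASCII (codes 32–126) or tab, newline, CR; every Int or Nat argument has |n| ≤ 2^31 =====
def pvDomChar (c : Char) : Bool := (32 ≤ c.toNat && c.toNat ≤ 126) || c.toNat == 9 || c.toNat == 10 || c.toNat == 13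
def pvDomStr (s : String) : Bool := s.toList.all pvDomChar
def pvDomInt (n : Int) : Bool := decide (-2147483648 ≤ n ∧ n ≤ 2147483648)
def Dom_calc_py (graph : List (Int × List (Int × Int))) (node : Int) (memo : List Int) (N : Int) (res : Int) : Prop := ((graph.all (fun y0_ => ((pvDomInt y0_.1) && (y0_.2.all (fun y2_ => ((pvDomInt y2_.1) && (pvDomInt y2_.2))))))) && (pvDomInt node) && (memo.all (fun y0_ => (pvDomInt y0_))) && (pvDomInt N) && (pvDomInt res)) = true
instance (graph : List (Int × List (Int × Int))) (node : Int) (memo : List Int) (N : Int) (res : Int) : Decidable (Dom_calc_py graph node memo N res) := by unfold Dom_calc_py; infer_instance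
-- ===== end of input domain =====

-- B replaces A's recursive backtracking DFS by an iterative DFS over an explicit
-- stack of frames (node, accumulated xor, edge list, next index, best result),
-- marking a node on push and un-marking it on pop (objective: alternative; the
-- equivalence proved is about the return value — both leave memo net unchanged).

-- ===== PORT A =====
def pvINF : Int := 2 ^ 61

-- fuel used by both ports to make the recursion total; each recursive descent
-- marks one fresh edge-target in memo, so the recursion depth never exceeds the
-- total number of edges + 1 and this fuel is never exhausted.
def pvFuel (graph : List (Int × List (Int × Int))) : Nat :=
  (graph.foldl (fun s p => s + p.2.length) 0) + 2

-- literal port of A's `calc` (depth fuel added for totality)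
def pvCalcA (graph : List (Int × List (Int × Int))) (N : Int) :
    Nat → List Int → Int → Int → Int
  | f, memo, node, acc =>
    if node == N then acc
    else
      match f with
      | 0 => pvINF
      | Nat.succ f' =>
        let next := PySem.Dict.getD ⟨graph⟩ node []
        (next.foldl (fun (st : List Int × Int) uw =>
            if PySem.Set.contains st.1 uw.1 then st
            else
              let memo1 := PySem.Set.add st.1 uw.1
              let r := pvCalcA graph N f' memo1 uw.1 (PySem.Int.bxor acc uw.2)
              let memo2 := PySem.Set.discard memo1 uw.1
              (memo2, if r < st.2 then r else st.2)) (memo, pvINF)).2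

def calc_py (graph : List (Int × List (Int × Int))) (node : Int) (memo : List Int) (N : Int) (res : Int) : Int :=
  pvCalcA graph N (pvFuel graph) memo node res

-- ===== PORT B =====
-- frame: (cur, acc, edges, i, result, fuel)
abbrev pvFrame := Int × Int × List (Int × Int) × Nat × Int × Nat

def pvMaxAdj (graph : List (Int × List (Int × Int))) : Nat :=
  graph.foldl (fun m p => max m p.2.length) 0

-- upper bound on the number of machine steps from a stack (used as step fuel)
def pvPhi (K : Nat) : List pvFrame → Nat
  | [] => 0
  | fr :: rest => (fr.2.2.1.length - fr.2.2.2.1 + 1) * K ^ fr.2.2.2.2.2 + pvPhi K rest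

-- literal port of B's `calc` loop (step fuel added for totality; the initial
-- fuel pvPhi … + 1 is never exhausted, and a frame whose depth-fuel field is 0
-- is treated as exhausted — the initial depth fuel is never consumed in full)
def pvRun (graph : List (Int × List (Int × Int))) (N : Int) :
    Nat → List pvFrame → List Int → Int
  | 0, _, _ => pvINF
  | Nat.succ _, [], _ => pvINF
  | Nat.succ sf, fr :: rest, memo =>
    if h : fr.2.2.2.2.2 ≠ 0 ∧ fr.2.2.2.1 < fr.2.2.1.length then
      let uw := fr.2.2.1[fr.2.2.2.1]'h.2
      if PySem.Set.contains memo uw.1 then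
        pvRun graph N sf ((fr.1, fr.2.1, fr.2.2.1, fr.2.2.2.1 + 1, fr.2.2.2.2.1, fr.2.2.2.2.2) :: rest) memo
      else if uw.1 == N then
        pvRun graph N sf ((fr.1, fr.2.1, fr.2.2.1, fr.2.2.2.1 + 1,
          (if PySem.Int.bxor fr.2.1 uw.2 < fr.2.2.2.2.1 then PySem.Int.bxor fr.2.1 uw.2 else fr.2.2.2.2.1),
          fr.2.2.2.2.2) :: rest) memo
      else
        pvRun graph N sf ((uw.1, PySem.Int.bxor fr.2.1 uw.2, PySem.Dict.getD ⟨graph⟩ uw.1 [], 0, pvINF, fr.2.2.2.2.2 - 1)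
            :: (fr.1, fr.2.1, fr.2.2.1, fr.2.2.2.1 + 1, fr.2.2.2.2.1, fr.2.2.2.2.2) :: rest)
          (PySem.Set.add memo uw.1)
    else
      match rest with
      | [] => fr.2.2.2.2.1
      | pfr :: rs =>
        pvRun graph N sf ((pfr.1, pfr.2.1, pfr.2.2.1, pfr.2.2.2.1,
          (if fr.2.2.2.2.1 < pfr.2.2.2.2.1 then fr.2.2.2.2.1 else pfr.2.2.2.2.1),
          pfr.2.2.2.2.2) :: rs) (PySem.Set.discard memo fr.1)

def calc_py_alt (graph : List (Int × List (Int × Int))) (node : Int) (memo : List Int) (N : Int) (res : Int) : Int :=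
  if node == N then res
  else
    let st : List pvFrame := [(node, res, PySem.Dict.getD ⟨graph⟩ node [], 0, pvINF, pvFuel graph)]
    pvRun graph N (pvPhi (pvMaxAdj graph + 2) st + 1) st memo

-- ===== PRECONDITION & SPEC =====
def Spec_calc_py (graph : List (Int × List (Int × Int))) (node : Int) (memo : List Int) (N : Int) (res : Int) (out : Int) : Prop := out = calc_py_alt graph node memo N res
instance (graph : List (Int × List (Int × Int))) (node : Int) (memo : List Int) (N : Int) (res : Int) (out : Int) : Decidable (Spec_calc_py graph node memo N res out) := by unfold Spec_calc_py; infer_instance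

-- ===== CLAIM (what is proved, stated in full; the proofs are below) =====
def Claim_equal_calc_py : Prop := ∀ (graph : List (Int × List (Int × Int))) (node : Int) (memo : List Int) (N : Int) (res : Int), Dom_calc_py graph node memo N res → Spec_calc_py graph node memo N res (calc_py graph node memo N res)

-- ===== LEMMAS AND PROOFS =====

theorem pvFoldlMax_init_le : ∀ (l : List (Int × List (Int × Int))) (a : Nat),
    a ≤ l.foldl (fun m p => max m p.2.length) a := by
  intro l
  induction l with
  | nil => intro a; simp
  | cons h t ih =>
    intro a
    exact le_trans (le_max_left _ _) (ih (max a h.2.length))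

theorem pvMem_le_foldlMax : ∀ (l : List (Int × List (Int × Int))) (a : Nat)
    (p : Int × List (Int × Int)), p ∈ l →
    p.2.length ≤ l.foldl (fun m p => max m p.2.length) a := by
  intro l
  induction l with
  | nil => intro a p hp; cases hp
  | cons h t ih =>
    intro a p hp
    rcases List.mem_cons.mp hp with rfl | hp
    · exact le_trans (le_max_right _ _) (pvFoldlMax_init_le t _)
    · exact ih _ _ hp

theorem pvAdj_le_maxAdj (graph : List (Int × List (Int × Int))) (u : Int) :
    (PySem.Dict.getD ⟨graph⟩ u []).length ≤ pvMaxAdj graph := by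
  unfold PySem.Dict.getD
  cases hg : PySem.Dict.get? (⟨graph⟩ : PySem.Dict Int (List (Int × Int))) u with
  | none => simp
  | some v =>
    have hmem := PySem.Dict.mem_items_of_get?_eq_some _ hg
    simpa using pvMem_le_foldlMax graph 0 (u, v) hmem

-- Φ decreases when a frame advances its edge index (any new result value)
theorem pvPhi_advance (K : Nat) (hK : 2 ≤ K) (cur acc : Int) (es : List (Int × Int))
    (i : Nat) (r r' : Int) (k : Nat) (rest : List pvFrame) (hi : i < es.length) :
    pvPhi K ((cur, acc, es, i + 1, r', k) :: rest) < pvPhi K ((cur, acc, es, i, r, k) :: rest) := by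
  simp only [pvPhi]
  have hp : 0 < K ^ k := Nat.pow_pos (by omega)
  have h1 : es.length - (i + 1) + 1 < es.length - i + 1 := by omega
  have := (Nat.mul_lt_mul_right hp).mpr h1
  omega

-- Φ decreases when a frame is popped (parent result update is Φ-neutral)
theorem pvPhi_pop (K : Nat) (hK : 2 ≤ K) (fr : pvFrame) (pc pa : Int)
    (pes : List (Int × Int)) (pi : Nat) (pr r' : Int) (pf : Nat) (rs : List pvFrame) :
    pvPhi K ((pc, pa, pes, pi, r', pf) :: rs)
      < pvPhi K (fr :: (pc, pa, pes, pi, pr, pf) :: rs) := by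
  simp only [pvPhi]
  have hp : 0 < (fr.2.2.1.length - fr.2.2.2.1 + 1) * K ^ fr.2.2.2.2.2 :=
    Nat.mul_pos (by omega) (Nat.pow_pos (by omega))
  omega

-- Φ decreases when a child frame is pushed, for K = pvMaxAdj graph + 2
theorem pvPhi_push (graph : List (Int × List (Int × Int))) (cur acc : Int)
    (es : List (Int × Int)) (i : Nat) (r r' : Int) (k : Nat) (rest : List pvFrame)
    (hi : i < es.length) (hk : k ≠ 0) (u a' : Int) :
    pvPhi (pvMaxAdj graph + 2)
        ((u, a', PySem.Dict.getD ⟨graph⟩ u [], 0, pvINF, k - 1)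
          :: (cur, acc, es, i + 1, r', k) :: rest)
      < pvPhi (pvMaxAdj graph + 2) ((cur, acc, es, i, r, k) :: rest) := by
  simp only [pvPhi]
  have hK : (PySem.Dict.getD (⟨graph⟩ : PySem.Dict Int (List (Int × Int))) u []).length + 1
      < pvMaxAdj graph + 2 := by
    have := pvAdj_le_maxAdj graph u
    omega
  have hf : k = (k - 1) + 1 := by omega
  have hp : 0 < (pvMaxAdj graph + 2) ^ (k - 1) := Nat.pow_pos (by omega)
  have hchild : ((PySem.Dict.getD (⟨graph⟩ : PySem.Dict Int (List (Int × Int))) u []).length - 0 + 1)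
        * (pvMaxAdj graph + 2) ^ (k - 1)
      < (pvMaxAdj graph + 2) ^ k := by
    calc ((PySem.Dict.getD (⟨graph⟩ : PySem.Dict Int (List (Int × Int))) u []).length - 0 + 1)
            * (pvMaxAdj graph + 2) ^ (k - 1)
        < (pvMaxAdj graph + 2) * (pvMaxAdj graph + 2) ^ (k - 1) :=
          (Nat.mul_lt_mul_right hp).mpr (by omega)
      _ = (pvMaxAdj graph + 2) ^ k := by
          conv_rhs => rw [hf]
          rw [pow_succ]
          ring
  have hp2 : 0 < (pvMaxAdj graph + 2) ^ k := Nat.pow_pos (by omega)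
  have h1 : es.length - (i + 1) + 1 + 1 ≤ es.length - i + 1 := by omega
  have h2 := Nat.mul_le_mul_right ((pvMaxAdj graph + 2) ^ k) h1
  have h3 : (es.length - (i + 1) + 1 + 1) * (pvMaxAdj graph + 2) ^ k
      = (es.length - (i + 1) + 1) * (pvMaxAdj graph + 2) ^ k
        + (pvMaxAdj graph + 2) ^ k := by ring
  omega

-- with enough step fuel the machine's value does not depend on the fuel
theorem pvRun_mono (graph : List (Int × List (Int × Int))) (N : Int) :
    ∀ (sf sf' : Nat) (stack : List pvFrame) (memo : List Int),
      pvPhi (pvMaxAdj graph + 2) stack < sf → pvPhi (pvMaxAdj graph + 2) stack < sf' →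
      pvRun graph N sf stack memo = pvRun graph N sf' stack memo := by
  intro sf
  induction sf with
  | zero => intro sf' stack memo h1 _; omega
  | succ sf ih =>
    intro sf' stack memo h1 h2
    match sf', stack with
    | 0, _ => omega
    | Nat.succ sf', [] => rfl
    | Nat.succ sf', fr :: rest =>
      obtain ⟨cur, acc, es, i, r, f⟩ := fr
      rw [pvRun.eq_def, pvRun.eq_def]
      by_cases h : f ≠ 0 ∧ i < es.length
      · simp only [dif_pos h]
        have hK2 : 2 ≤ pvMaxAdj graph + 2 := by omega
        by_cases hc : PySem.Set.contains memo (es[i]'h.2).1 = true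
        · simp only [hc, if_true]
          exact ih _ _ _
            (by have := pvPhi_advance (pvMaxAdj graph + 2) hK2 cur acc es i r r f rest h.2; omega)
            (by have := pvPhi_advance (pvMaxAdj graph + 2) hK2 cur acc es i r r f rest h.2; omega)
        · simp only [hc, Bool.false_eq_true, if_false]
          by_cases hN : ((es[i]'h.2).1 == N) = true
          · simp only [hN, if_true]
            exact ih _ _ _
              (by have := pvPhi_advance (pvMaxAdj graph + 2) hK2 cur acc es i r
                    (if PySem.Int.bxor acc (es[i]'h.2).2 < r then PySem.Int.bxor acc (es[i]'h.2).2 else r)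
                    f rest h.2; omega)
              (by have := pvPhi_advance (pvMaxAdj graph + 2) hK2 cur acc es i r
                    (if PySem.Int.bxor acc (es[i]'h.2).2 < r then PySem.Int.bxor acc (es[i]'h.2).2 else r)
                    f rest h.2; omega)
          · simp only [hN, Bool.false_eq_true, if_false]
            exact ih _ _ _
              (by have := pvPhi_push graph cur acc es i r r f rest h.2 h.1 (es[i]'h.2).1
                    (PySem.Int.bxor acc (es[i]'h.2).2); omega)
              (by have := pvPhi_push graph cur acc es i r r f rest h.2 h.1 (es[i]'h.2).1
                    (PySem.Int.bxor acc (es[i]'h.2).2); omega)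
      · simp only [dif_neg h]
        rcases rest with _ | ⟨⟨pc, pa, pes, pi, pr, pf⟩, rs⟩
        · rfl
        · exact ih _ _ _
            (by dsimp only; have := pvPhi_pop (pvMaxAdj graph + 2) (by omega) (cur, acc, es, i, r, f)
                  pc pa pes pi pr (if r < pr then r else pr) pf rs; omega)
            (by dsimp only; have := pvPhi_pop (pvMaxAdj graph + 2) (by omega) (cur, acc, es, i, r, f)
                  pc pa pes pi pr (if r < pr then r else pr) pf rs; omega)

-- A's loop over the remaining edges, with the memo restoration already applied
def pvLoop (graph : List (Int × List (Int × Int))) (N : Int) :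
    Nat → List Int → Int → List (Int × Int) → Int → Int
  | 0, _, _, _, r => r
  | _ + 1, _, _, [], r => r
  | f' + 1, memo, acc, uw :: t, r =>
    if PySem.Set.contains memo uw.1 then pvLoop graph N (f' + 1) memo acc t r
    else
      pvLoop graph N (f' + 1) memo acc t
        (if pvCalcA graph N f' (PySem.Set.add memo uw.1) uw.1 (PySem.Int.bxor acc uw.2) < r
         then pvCalcA graph N f' (PySem.Set.add memo uw.1) uw.1 (PySem.Int.bxor acc uw.2) else r)

-- the machine's pop step, at its canonical step fuel
def pvPop (graph : List (Int × List (Int × Int))) (N : Int)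
    (cur v : Int) (rest : List pvFrame) (memo : List Int) : Int :=
  match rest with
  | [] => v
  | pfr :: rs =>
    pvRun graph N
      (pvPhi (pvMaxAdj graph + 2) ((pfr.1, pfr.2.1, pfr.2.2.1, pfr.2.2.2.1,
        (if v < pfr.2.2.2.2.1 then v else pfr.2.2.2.2.1), pfr.2.2.2.2.2) :: rs) + 1)
      ((pfr.1, pfr.2.1, pfr.2.2.1, pfr.2.2.2.1,
        (if v < pfr.2.2.2.2.1 then v else pfr.2.2.2.2.1), pfr.2.2.2.2.2) :: rs)
      (PySem.Set.discard memo cur)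

theorem pvRestore (memo : List Int) (u : Int) (h : PySem.Set.contains memo u = false) :
    PySem.Set.discard (PySem.Set.add memo u) u = memo := by
  unfold PySem.Set.add PySem.Set.discard PySem.Set.contains at *
  rw [if_neg (by simp only [h]; simp)]
  rw [List.filter_append]
  simp only [List.filter_cons, List.filter_nil]
  have hnm : u ∉ memo := by
    intro hx
    rw [← List.contains_iff_mem] at hx
    rw [h] at hx
    cases hx
  have hall : ∀ x ∈ memo, (!x == u) = true := by
    intro x hx
    simp only [Bool.not_eq_eq_eq_not, Bool.not_true, beq_eq_false_iff_ne]
    intro he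
    exact hnm (he ▸ hx)
  simp [List.filter_eq_self.2 hall]

theorem pvFold_snd (graph : List (Int × List (Int × Int))) (N : Int) (f' : Nat) (acc : Int) :
    ∀ (t : List (Int × Int)) (memo : List Int) (r : Int),
      (t.foldl (fun (st : List Int × Int) uw =>
          if PySem.Set.contains st.1 uw.1 then st
          else
            let memo1 := PySem.Set.add st.1 uw.1
            let rr := pvCalcA graph N f' memo1 uw.1 (PySem.Int.bxor acc uw.2)
            let memo2 := PySem.Set.discard memo1 uw.1
            (memo2, if rr < st.2 then rr else st.2)) (memo, r)).2
      = pvLoop graph N (f' + 1) memo acc t r := by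
  intro t
  induction t with
  | nil => intro memo r; simp [pvLoop]
  | cons uw t ih =>
    intro memo r
    by_cases hc : PySem.Set.contains memo uw.1 = true
    · simp only [List.foldl_cons, hc, if_true, pvLoop]
      exact ih memo r
    · simp only [Bool.not_eq_true] at hc
      simp only [List.foldl_cons, hc, Bool.false_eq_true, if_false, pvLoop]
      rw [pvRestore memo uw.1 hc]
      exact ih memo _

theorem pvCalcA_char (graph : List (Int × List (Int × Int))) (N : Int) (f : Nat)
    (memo : List Int) (node acc : Int) (hne : (node == N) = false) :
    pvCalcA graph N f memo node acc
      = pvLoop graph N f memo acc (PySem.Dict.getD ⟨graph⟩ node []) pvINF := by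
  cases f with
  | zero =>
    rw [pvCalcA.eq_def]
    simp [hne, pvLoop]
  | succ f' =>
    rw [pvCalcA.eq_def]
    simp only [hne, Bool.false_eq_true, if_false]
    exact pvFold_snd graph N f' acc _ memo pvINF

theorem pvRun_eq (graph : List (Int × List (Int × Int))) (N : Int) :
    ∀ (k n : Nat) (es : List (Int × Int)) (i : Nat), es.length - i ≤ n →
      ∀ (cur acc r : Int) (memo : List Int) (rest : List pvFrame) (sf : Nat),
        pvPhi (pvMaxAdj graph + 2) ((cur, acc, es, i, r, k) :: rest) < sf →
        pvRun graph N sf ((cur, acc, es, i, r, k) :: rest) memo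
          = pvPop graph N cur (pvLoop graph N k memo acc (es.drop i) r) rest memo := by
  intro k
  induction k using Nat.strong_induction_on with
  | _ k IHk =>
    intro n
    induction n with
    | zero =>
      intro es i hi cur acc r memo rest sf hsf
      have hge : ¬ i < es.length := by omega
      obtain ⟨sf', rfl⟩ : ∃ sf', sf = sf' + 1 := ⟨sf - 1, by omega⟩
      rw [pvRun.eq_def]
      simp only [dif_neg (by simp [hge] : ¬ ((k ≠ 0) ∧ i < es.length))]
      have hdrop : es.drop i = [] := List.drop_eq_nil_of_le (by omega)
      rw [hdrop]
      have hloop : pvLoop graph N k memo acc [] r = r := by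
        cases k <;> simp [pvLoop]
      rw [hloop]
      rcases rest with _ | ⟨⟨pc, pa, pes, pi, pr, pf⟩, rs⟩
      · rfl
      · simp only [pvPop]
        apply pvRun_mono
        · have := pvPhi_pop (pvMaxAdj graph + 2) (by omega) (cur, acc, es, i, r, k)
            pc pa pes pi pr (if r < pr then r else pr) pf rs
          omega
        · omega
    | succ n IHn =>
      intro es i hi cur acc r memo rest sf hsf
      obtain ⟨sf', rfl⟩ : ∃ sf', sf = sf' + 1 := ⟨sf - 1, by omega⟩
      by_cases hk : k = 0
      · subst hk
        rw [pvRun.eq_def]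
        simp only [dif_neg (by simp : ¬ ((0 ≠ 0) ∧ i < es.length))]
        simp only [pvLoop]
        rcases rest with _ | ⟨⟨pc, pa, pes, pi, pr, pf⟩, rs⟩
        · rfl
        · simp only [pvPop]
          apply pvRun_mono
          · have := pvPhi_pop (pvMaxAdj graph + 2) (by omega) (cur, acc, es, i, r, 0)
              pc pa pes pi pr (if r < pr then r else pr) pf rs
            omega
          · omega
      · by_cases hlt : i < es.length
        · -- step case
          obtain ⟨k', rfl⟩ : ∃ k', k = k' + 1 := ⟨k - 1, by omega⟩
          have hdrop := List.drop_eq_getElem_cons hlt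
          have hK2 : 2 ≤ pvMaxAdj graph + 2 := by omega
          rw [pvRun.eq_def]
          simp only [dif_pos (And.intro hk hlt)]
          set uw := es[i]'hlt with huw
          by_cases hc : PySem.Set.contains memo uw.1
          · simp only [hc, if_true]
            rw [IHn es (i + 1) (by omega) cur acc r memo rest sf'
              (by have := pvPhi_advance (pvMaxAdj graph + 2) hK2 cur acc es i r r (k' + 1) rest hlt
                  omega)]
            rw [hdrop]
            simp only [pvLoop, hc, if_true]
          · simp only [Bool.not_eq_true] at hc
            simp only [hc, Bool.false_eq_true, if_false]
            by_cases hN : (uw.1 == N) = true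
            · simp only [hN, if_true]
              rw [IHn es (i + 1) (by omega) cur acc _ memo rest sf'
                (by have := pvPhi_advance (pvMaxAdj graph + 2) hK2 cur acc es i r
                      (if PySem.Int.bxor acc uw.2 < r then PySem.Int.bxor acc uw.2 else r)
                      (k' + 1) rest hlt
                    omega)]
              rw [hdrop]
              simp only [pvLoop, hc, Bool.false_eq_true, if_false]
              have hcv : pvCalcA graph N k' (PySem.Set.add memo uw.1) uw.1 (PySem.Int.bxor acc uw.2)
                  = PySem.Int.bxor acc uw.2 := by
                rw [pvCalcA.eq_def]; simp [hN]
              rw [hcv]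
            · simp only [hN, Bool.false_eq_true, if_false]
              -- push: evaluate the child frame with IHk
              have hsfc : pvPhi (pvMaxAdj graph + 2)
                  ((uw.1, PySem.Int.bxor acc uw.2, PySem.Dict.getD ⟨graph⟩ uw.1 [], 0, pvINF, k' + 1 - 1)
                    :: (cur, acc, es, i + 1, r, k' + 1) :: rest) < sf' := by
                have := pvPhi_push graph cur acc es i r r (k' + 1) rest hlt hk uw.1
                  (PySem.Int.bxor acc uw.2)
                omega
              simp only [Nat.add_sub_cancel] at hsfc ⊢
              have hchild := IHk k' (by omega) (PySem.Dict.getD ⟨graph⟩ uw.1 []).length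
                (PySem.Dict.getD ⟨graph⟩ uw.1 []) 0 (by omega) uw.1 (PySem.Int.bxor acc uw.2) pvINF
                (PySem.Set.add memo uw.1) ((cur, acc, es, i + 1, r, k' + 1) :: rest) sf' hsfc
              simp only [List.drop_zero] at hchild
              rw [hchild]
              simp only [pvPop]
              rw [pvRestore memo uw.1 hc]
              have hcv : pvLoop graph N k' (PySem.Set.add memo uw.1) (PySem.Int.bxor acc uw.2)
                    (PySem.Dict.getD ⟨graph⟩ uw.1 []) pvINF
                  = pvCalcA graph N k' (PySem.Set.add memo uw.1) uw.1 (PySem.Int.bxor acc uw.2) := by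
                rw [pvCalcA_char graph N k' (PySem.Set.add memo uw.1) uw.1 (PySem.Int.bxor acc uw.2)
                  (by simpa using hN)]
              rw [hcv]
              rw [IHn es (i + 1) (by omega) cur acc _ memo rest
                (pvPhi (pvMaxAdj graph + 2) ((cur, acc, es, i + 1,
                  (if pvCalcA graph N k' (PySem.Set.add memo uw.1) uw.1 (PySem.Int.bxor acc uw.2) < r
                   then pvCalcA graph N k' (PySem.Set.add memo uw.1) uw.1 (PySem.Int.bxor acc uw.2)
                   else r), k' + 1) :: rest) + 1) (by omega)]
              rw [hdrop]
              simp only [pvLoop, hc, Bool.false_eq_true, if_false]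
              cases rest <;> rfl
        · -- exhausted: pop
          rw [pvRun.eq_def]
          simp only [dif_neg (by simp [hlt] : ¬ ((k ≠ 0) ∧ i < es.length))]
          have hdrop : es.drop i = [] := List.drop_eq_nil_of_le (by omega)
          rw [hdrop]
          have hloop : pvLoop graph N k memo acc [] r = r := by
            cases k <;> simp [pvLoop]
          rw [hloop]
          rcases rest with _ | ⟨⟨pc, pa, pes, pi, pr, pf⟩, rs⟩
          · rfl
          · simp only [pvPop]
            apply pvRun_mono
            · have := pvPhi_pop (pvMaxAdj graph + 2) (by omega) (cur, acc, es, i, r, k)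
                pc pa pes pi pr (if r < pr then r else pr) pf rs
              omega
            · omega

-- ===== VERDICT (by name: the statement is the Claim_ definition above) =====
theorem calc_py_spec : Claim_equal_calc_py := by
  intro graph node memo N res _
  unfold Spec_calc_py calc_py calc_py_alt
  by_cases hn : (node == N) = true
  · rw [pvCalcA.eq_def]
    simp [hn]
  · simp only [Bool.not_eq_true] at hn
    simp only [hn, Bool.false_eq_true, if_false]
    rw [pvRun_eq graph N (pvFuel graph) (PySem.Dict.getD ⟨graph⟩ node []).length
      (PySem.Dict.getD ⟨graph⟩ node []) 0 (by omega) node res pvINF memo [] _ (by omega)]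
    simp only [List.drop_zero, pvPop]
    exact pvCalcA_char graph N (pvFuel graph) memo node res hn
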